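-- pv_equiv track=rewrite | github.com/fangzheng123/TEBNER | util/entity_util.py | get_entity_boundary_no_seg
-- ===== SOURCE A (Python) =====
-- def get_entity_boundary_no_seg(connect_index_list, max_len) -> list:
--     """
--     根据连接关系确定实体边界(无分词)
--     :param connect_index_list:
--     :return:
--     """
--     entity_boundary_list = []
--     if len(connect_index_list) > 0:
--         index = 1
--         pre_token_index = connect_index_list[0]
--         entity_begin = pre_token_index
--         while index < len(connect_index_list):
--             current_token_index = connect_index_list[index]
--             if current_token_index != pre_token_index + 1:
--                 entity_end = pre_token_index + 1
--                 if entity_begin < entity_end < max_len - 1: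
--                     entity_boundary_list.append((entity_begin, entity_end))
--
--                 entity_begin = current_token_index
--
--             pre_token_index = current_token_index
--             index += 1
--
--         if pre_token_index + 2 < max_len:
--             entity_end = pre_token_index + 1
--         else:
--             entity_end = max_len - 2
--
--         if entity_begin < entity_end < max_len - 1:
--             entity_boundary_list.append((entity_begin, entity_end))
--
--     return entity_boundary_list
-- ===== SOURCE B (Python) =====
-- def get_entity_boundary_no_seg(connect_index_list, max_len) -> list:
--     """Two-pass version: first gather maximal consecutive runs as (begin, last)
--     pairs, then turn runs into boundaries with the terminal clamp."""
--     if not connect_index_list: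
--         return []
--     runs = []
--     begin = last = connect_index_list[0]
--     for x in connect_index_list[1:]:
--         if x != last + 1:
--             runs.append((begin, last))
--             begin = x
--         last = x
--     runs.append((begin, last))
--
--     boundaries = []
--     for i, (b, l) in enumerate(runs):
--         if i == len(runs) - 1:
--             end = l + 1 if l + 2 < max_len else max_len - 2
--         else:
--             end = l + 1
--         if b < end < max_len - 1:
--             boundaries.append((b, end))
--     return boundaries
-- ===== Notes on version B (the rewrite author's own statement) =====
-- stated objective: alternative
-- what changed: Replaced A's single while-loop that interleaves run tracking with boundary emission by a two-pass decomposition: first collect maximal consecutive runs as (begin,last) pairs, then a separate pass converts runs to boundaries (end=last+1, clamped on the last run) and filters begin < end < max_len-1.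
import Mathlib
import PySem

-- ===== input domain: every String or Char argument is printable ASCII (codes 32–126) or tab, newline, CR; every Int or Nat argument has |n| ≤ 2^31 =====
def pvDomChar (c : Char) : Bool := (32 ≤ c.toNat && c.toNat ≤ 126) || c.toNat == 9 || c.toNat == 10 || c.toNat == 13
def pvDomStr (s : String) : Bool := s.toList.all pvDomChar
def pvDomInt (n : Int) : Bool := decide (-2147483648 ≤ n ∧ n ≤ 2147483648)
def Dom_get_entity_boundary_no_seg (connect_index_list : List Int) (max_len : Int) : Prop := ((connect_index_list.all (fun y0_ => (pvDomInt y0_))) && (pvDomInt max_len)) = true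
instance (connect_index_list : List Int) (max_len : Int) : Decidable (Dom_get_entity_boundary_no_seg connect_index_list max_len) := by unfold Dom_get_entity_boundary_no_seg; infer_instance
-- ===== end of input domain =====

-- B replaces A's single interleaved while-loop by two passes (collect maximal
-- consecutive runs, then emit/clamp/filter boundaries); objective: alternative decomposition.


-- ===== PORT A =====
-- A's while-loop: state (pre_token_index, entity_begin, entity_boundary_list),
-- recursion over the remaining indices; the base case is A's code after the loop.
def gebALoop (max_len : Int) (pre begin_ : Int) (acc : List (Int × Int)) :
    List Int → List (Int × Int)
  | [] =>
    let e := if pre + 2 < max_len then pre + 1 else max_len - 2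
    if begin_ < e ∧ e < max_len - 1 then acc ++ [(begin_, e)] else acc
  | cur :: rest =>
    if cur ≠ pre + 1 then
      let e := pre + 1
      let acc' := if begin_ < e ∧ e < max_len - 1 then acc ++ [(begin_, e)] else acc
      gebALoop max_len cur cur acc' rest
    else
      gebALoop max_len cur begin_ acc rest

def get_entity_boundary_no_seg (connect_index_list : List Int) (max_len : Int) : List (Int × Int) :=
  match connect_index_list with
  | [] => []
  | h :: rest => gebALoop max_len h h [] rest

-- ===== PORT B =====
-- First pass of Source B: collect maximal consecutive runs as (begin, last) pairs.
def gebRuns (begin_ last : Int) : List Int → List (Int × Int)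
  | [] => [(begin_, last)]
  | x :: rest =>
    if x ≠ last + 1 then (begin_, last) :: gebRuns x x rest
    else gebRuns begin_ x rest

-- Second pass of Source B: non-last runs get end = last+1, the last run is clamped;
-- keep a boundary only when begin < end < max_len - 1.
def gebEmit (max_len : Int) : List (Int × Int) → List (Int × Int)
  | [] => []
  | [(b, l)] =>
    let e := if l + 2 < max_len then l + 1 else max_len - 2
    if b < e ∧ e < max_len - 1 then [(b, e)] else []
  | (b, l) :: r :: rest =>
    (if b < l + 1 ∧ l + 1 < max_len - 1 then [(b, l + 1)] else []) ++ gebEmit max_len (r :: rest)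

def get_entity_boundary_no_seg_alt (connect_index_list : List Int) (max_len : Int) : List (Int × Int) :=
  match connect_index_list with
  | [] => []
  | h :: rest => gebEmit max_len (gebRuns h h rest)

-- ===== PRECONDITION & SPEC =====
def Spec_get_entity_boundary_no_seg (connect_index_list : List Int) (max_len : Int) (out : List (Int × Int)) : Prop := out = get_entity_boundary_no_seg_alt connect_index_list max_len
instance (connect_index_list : List Int) (max_len : Int) (out : List (Int × Int)) : Decidable (Spec_get_entity_boundary_no_seg connect_index_list max_len out) := by unfold Spec_get_entity_boundary_no_seg; infer_instance

-- ===== CLAIM (what is proved, stated in full; the proofs are below) =====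
def Claim_equal_get_entity_boundary_no_seg : Prop := ∀ (connect_index_list : List Int) (max_len : Int), Dom_get_entity_boundary_no_seg connect_index_list max_len → Spec_get_entity_boundary_no_seg connect_index_list max_len (get_entity_boundary_no_seg connect_index_list max_len)

-- ===== LEMMAS AND PROOFS =====
theorem gebRuns_ne_nil (begin_ last : Int) (xs : List Int) : gebRuns begin_ last xs ≠ [] := by
  induction xs generalizing begin_ last with
  | nil => simp [gebRuns]
  | cons x rest ih =>
    simp only [gebRuns]
    split
    · simp
    · exact ih begin_ x

theorem gebEmit_cons (max_len b l : Int) (rs : List (Int × Int)) (h : rs ≠ []) :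
    gebEmit max_len ((b, l) :: rs) =
      (if b < l + 1 ∧ l + 1 < max_len - 1 then [(b, l + 1)] else []) ++ gebEmit max_len rs := by
  cases rs with
  | nil => exact absurd rfl h
  | cons r rest => rfl

theorem gebALoop_eq (max_len : Int) (rest : List Int) :
    ∀ (pre begin_ : Int) (acc : List (Int × Int)),
      gebALoop max_len pre begin_ acc rest = acc ++ gebEmit max_len (gebRuns begin_ pre rest) := by
  induction rest with
  | nil =>
    intro pre begin_ acc
    simp only [gebALoop, gebRuns, gebEmit]
    split <;> split <;> simp
  | cons cur rest ih =>
    intro pre begin_ acc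
    simp only [gebALoop, gebRuns]
    by_cases hne : cur ≠ pre + 1
    · simp only [if_pos hne]
      rw [ih, gebEmit_cons max_len begin_ pre _ (gebRuns_ne_nil cur cur rest)]
      split <;> simp [List.append_assoc]
    · simp only [if_neg hne]
      exact ih cur begin_ acc

-- ===== VERDICT (by name: the statement is the Claim_ definition above) =====
theorem get_entity_boundary_no_seg_spec : Claim_equal_get_entity_boundary_no_seg := by
  intro l max_len _
  unfold Spec_get_entity_boundary_no_seg
  cases l with
  | nil => rfl
  | cons h rest =>
    simp only [get_entity_boundary_no_seg, get_entity_boundary_no_seg_alt]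
    rw [gebALoop_eq]
    rfl
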